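-- pv_equiv track=rewrite | github.com/SebsKk/RedditRadar | src/analysis/clustering.py | detect_post_type
-- ===== SOURCE A (Python) =====
-- POST_TYPES = {
--     "question": {
--         "name": "Question",
--         "keywords": [
--             "how", "what", "why", "when", "where", "who", "which",
--             "anyone", "help", "advice", "recommend", "suggest", "?",
--             "confused", "stuck", "struggling", "need", "looking for",
--         ],
--     },
--     "howto": {
--         "name": "How-To / Guide",
--         "keywords": [
--             "guide", "tutorial", "step by step", "how to", "walkthrough",
--             "instructions", "tips", "here's how", "method", "process",
--         ],
--     },
--     "win": {
--         "name": "Win / Success Story",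
--         "keywords": [
--             "finally", "achieved", "success", "milestone", "hit", "reached",
--             "excited", "proud", "made it", "first sale", "profitable",
--             "quit my job", "revenue", "customers", "launched",
--         ],
--     },
--     "rant": {
--         "name": "Rant / Frustration",
--         "keywords": [
--             "rant", "frustrated", "annoyed", "sick of", "tired of",
--             "hate", "terrible", "awful", "worst", "ridiculous", "vent",
--             "complain", "unfair", "scam", "warning",
--         ],
--     },
--     "discussion": {
--         "name": "Discussion / Opinion",
--         "keywords": [
--             "thoughts", "opinion", "think", "debate", "controversial",
--             "unpopular", "change my mind", "perspective", "view",
--         ],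
--     },
--     "news": {
--         "name": "News / Update",
--         "keywords": [
--             "news", "announcement", "update", "launched", "released",
--             "breaking", "just", "today", "new", "introduced",
--         ],
--     },
--     "resource": {
--         "name": "Resource / Tool",
--         "keywords": [
--             "resource", "tool", "list", "collection", "found this",
--             "sharing", "free", "useful", "check out", "recommend",
--         ],
--     },
-- }
--
-- def detect_post_type(title: str, body: str = "") -> tuple[str, str]:
--     """Detect the type/format of a post (question, how-to, win, rant, etc.).
--
--     Args:
--         title: Post title (primary signal)
--         body: Post body (secondary signal)
--
--     Returns:
--         Tuple of (post_type_id, post_type_name)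
--     """
--     text = f"{title} {body}".lower()
--
--     # Score each post type
--     scores = []
--     for type_id, type_data in POST_TYPES.items():
--         score = 0
--         for kw in type_data["keywords"]:
--             if kw in text:
--                 # Title matches count more
--                 if kw in title.lower():
--                     score += 2
--                 else:
--                     score += 1
--         scores.append((type_id, type_data["name"], score))
--
--     # Sort by score
--     scores.sort(key=lambda x: x[2], reverse=True)
--
--     # Return best match if score > 0, otherwise default to discussion
--     if scores[0][2] > 0:
--         return scores[0][0], scores[0][1]
--     return "discussion", "Discussion"
-- ===== SOURCE B (Python) =====
-- POST_TYPES = {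
--     "question": {
--         "name": "Question",
--         "keywords": [
--             "how", "what", "why", "when", "where", "who", "which",
--             "anyone", "help", "advice", "recommend", "suggest", "?",
--             "confused", "stuck", "struggling", "need", "looking for",
--         ],
--     },
--     "howto": {
--         "name": "How-To / Guide",
--         "keywords": [
--             "guide", "tutorial", "step by step", "how to", "walkthrough",
--             "instructions", "tips", "here's how", "method", "process",
--         ],
--     },
--     "win": {
--         "name": "Win / Success Story",
--         "keywords": [
--             "finally", "achieved", "success", "milestone", "hit", "reached",
--             "excited", "proud", "made it", "first sale", "profitable",
--             "quit my job", "revenue", "customers", "launched",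
--         ],
--     },
--     "rant": {
--         "name": "Rant / Frustration",
--         "keywords": [
--             "rant", "frustrated", "annoyed", "sick of", "tired of",
--             "hate", "terrible", "awful", "worst", "ridiculous", "vent",
--             "complain", "unfair", "scam", "warning",
--         ],
--     },
--     "discussion": {
--         "name": "Discussion / Opinion",
--         "keywords": [
--             "thoughts", "opinion", "think", "debate", "controversial",
--             "unpopular", "change my mind", "perspective", "view",
--         ],
--     },
--     "news": {
--         "name": "News / Update",
--         "keywords": [
--             "news", "announcement", "update", "launched", "released",
--             "breaking", "just", "today", "new", "introduced",
--         ],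
--     },
--     "resource": {
--         "name": "Resource / Tool",
--         "keywords": [
--             "resource", "tool", "list", "collection", "found this",
--             "sharing", "free", "useful", "check out", "recommend",
--         ],
--     },
-- }
--
--
-- def _keyword_weight(kw, title_lower, text):
--     """Weight of one keyword: 0 if absent, 2 if in the title, else 1."""
--     if kw not in text:
--         return 0
--     if kw in title_lower:
--         return 2
--     return 1
--
--
-- def _category_score(keywords, title_lower, text):
--     return sum(_keyword_weight(kw, title_lower, text) for kw in keywords)
--
--
-- def _first_best(cats, title_lower, text):
--     """Recursively pick the first (id, name, score) triple with the maximal score."""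
--     c, rest = cats[0], cats[1:]
--     mine = (c[0], c[1]["name"], _category_score(c[1]["keywords"], title_lower, text))
--     if not rest:
--         return mine
--     best = _first_best(rest, title_lower, text)
--     return mine if mine[2] >= best[2] else best
--
--
-- def detect_post_type(title: str, body: str = "") -> tuple[str, str]:
--     """Pick the first maximally scoring category by structural recursion; no score list, no sort."""
--     text = f"{title} {body}".lower()
--     best = _first_best(list(POST_TYPES.items()), title.lower(), text)
--     if best[2] > 0:
--         return best[0], best[1]
--     return "discussion", "Discussion"
-- ===== Notes on version B (the rewrite author's own statement) =====
-- stated objective: alternative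
-- what changed: Scores each category as a sum of per-keyword weights (a weight helper mapped over the keywords) instead of an accumulate-in-place loop, and selects the winner by structural recursion returning the first maximal triple instead of building a score list and stably reverse-sorting it.
import Mathlib
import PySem

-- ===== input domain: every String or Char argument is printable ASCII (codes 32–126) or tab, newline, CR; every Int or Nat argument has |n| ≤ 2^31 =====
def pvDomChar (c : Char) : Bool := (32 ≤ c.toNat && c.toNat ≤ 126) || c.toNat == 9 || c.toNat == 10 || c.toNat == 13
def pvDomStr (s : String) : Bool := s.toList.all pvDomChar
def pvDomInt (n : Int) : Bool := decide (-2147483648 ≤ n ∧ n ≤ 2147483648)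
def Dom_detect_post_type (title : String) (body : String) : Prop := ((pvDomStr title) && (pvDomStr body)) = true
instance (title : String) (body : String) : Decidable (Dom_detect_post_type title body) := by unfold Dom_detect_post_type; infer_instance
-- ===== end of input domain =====

-- B scores each category as a sum of per-keyword weights and picks the first maximal category
-- by structural recursion, instead of A's accumulate-loop scoring plus build-list-and-stable-
-- reverse-sort selection; objective: alternative (same cost, no sort).

-- ===== PORT A =====
-- POST_TYPES as a list of (type_id, name, keywords) in dict insertion order (shared constant)
def pvPostTypes : List (String × String × List String) := [
  ("question", "Question",
    ["how", "what", "why", "when", "where", "who", "which",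
     "anyone", "help", "advice", "recommend", "suggest", "?",
     "confused", "stuck", "struggling", "need", "looking for"]),
  ("howto", "How-To / Guide",
    ["guide", "tutorial", "step by step", "how to", "walkthrough",
     "instructions", "tips", "here's how", "method", "process"]),
  ("win", "Win / Success Story",
    ["finally", "achieved", "success", "milestone", "hit", "reached",
     "excited", "proud", "made it", "first sale", "profitable",
     "quit my job", "revenue", "customers", "launched"]),
  ("rant", "Rant / Frustration",
    ["rant", "frustrated", "annoyed", "sick of", "tired of",
     "hate", "terrible", "awful", "worst", "ridiculous", "vent",
     "complain", "unfair", "scam", "warning"]),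
  ("discussion", "Discussion / Opinion",
    ["thoughts", "opinion", "think", "debate", "controversial",
     "unpopular", "change my mind", "perspective", "view"]),
  ("news", "News / Update",
    ["news", "announcement", "update", "launched", "released",
     "breaking", "just", "today", "new", "introduced"]),
  ("resource", "Resource / Tool",
    ["resource", "tool", "list", "collection", "found this",
     "sharing", "free", "useful", "check out", "recommend"])]

def detect_post_type (title : String) (body : String) : String × String :=
  let text := PySem.Chars.lower (title.toList ++ ' ' :: body.toList)
  let scores := pvPostTypes.foldl (fun acc c =>
      acc ++ [(c.1, c.2.1,
        c.2.2.foldl (fun s kw =>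
          if PySem.Chars.isIn kw.toList text then
            (if PySem.Chars.isIn kw.toList (PySem.Chars.lower title.toList) then s + 2 else s + 1)
          else s) (0 : Int))]) []
  let ss := PySem.List.sorted scores (fun x => x.2.2) true
  let best := PySem.List.pyGetD ss 0 (("", "", 0) : String × String × Int)
  if best.2.2 > 0 then (best.1, best.2.1) else ("discussion", "Discussion")

-- ===== PORT B =====
-- weight of one keyword: 0 if absent from the text, 2 if in the lowered title, else 1
def pvWeight (kw : String) (tl : List Char) (text : List Char) : Int :=
  if !(PySem.Chars.isIn kw.toList text) then 0
  else if PySem.Chars.isIn kw.toList tl then 2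
  else 1

def pvScore (kws : List String) (tl : List Char) (text : List Char) : Int :=
  (kws.map (fun kw => pvWeight kw tl text)).sum

-- first (id, name, score) triple with maximal score, by structural recursion;
-- the [] arm is unreachable (Python's cats[0] would raise IndexError there)
def pvBest (tl : List Char) (text : List Char) :
    List (String × String × List String) → String × String × Int
  | [] => ("discussion", "Discussion", 0)
  | c :: rest =>
    let mine := (c.1, c.2.1, pvScore c.2.2 tl text)
    if rest = [] then mine
    else
      let best := pvBest tl text rest
      if mine.2.2 ≥ best.2.2 then mine else best

def detect_post_type_alt (title : String) (body : String) : String × String :=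
  let text := PySem.Chars.lower (title.toList ++ ' ' :: body.toList)
  let best := pvBest (PySem.Chars.lower title.toList) text pvPostTypes
  if best.2.2 > 0 then (best.1, best.2.1) else ("discussion", "Discussion")

-- ===== PRECONDITION & SPEC =====
def Spec_detect_post_type (title : String) (body : String) (out : String × String) : Prop := out = detect_post_type_alt title body
instance (title : String) (body : String) (out : String × String) : Decidable (Spec_detect_post_type title body out) := by unfold Spec_detect_post_type; infer_instance

-- ===== CLAIM (what is proved, stated in full; the proofs are below) =====
def Claim_equal_detect_post_type : Prop := ∀ (title : String) (body : String), Dom_detect_post_type title body → Spec_detect_post_type title body (detect_post_type title body)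

-- ===== LEMMAS AND PROOFS =====

-- A's accumulate-loop score equals B's sum of weights
lemma pv_score_eq (tl text : List Char) :
    ∀ (kws : List String) (s : Int),
      kws.foldl (fun s kw =>
        if PySem.Chars.isIn kw.toList text then
          (if PySem.Chars.isIn kw.toList tl then s + 2 else s + 1)
        else s) s = s + pvScore kws tl text := by
  intro kws
  induction kws with
  | nil => intro s; simp [pvScore]
  | cons kw kws ih =>
    intro s
    simp only [List.foldl_cons, ih, pvScore, List.map_cons, List.sum_cons, pvWeight]
    split_ifs <;> simp_all <;> omega

lemma pv_weight_nonneg (kw : String) (tl text : List Char) : 0 ≤ pvWeight kw tl text := by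
  unfold pvWeight; split_ifs <;> omega

lemma pv_score_nonneg (kws : List String) (tl text : List Char) : 0 ≤ pvScore kws tl text := by
  induction kws with
  | nil => simp [pvScore]
  | cons kw kws ih =>
    simp only [pvScore, List.map_cons, List.sum_cons] at *
    have := pv_weight_nonneg kw tl text
    omega

lemma pv_insertBy_cons {α : Type} (before : α → α → Bool) (x y : α) (ys : List α) :
    PySem.List.insertBy before x (y :: ys) =
      if before x y then x :: y :: ys else y :: PySem.List.insertBy before x ys := rfl

-- the running strict-< foldl argmax equals "head of the stable reverse sort, unless the seed beats it"
lemma pv_fold_eq_sorted (f : String × String × List String → Int) :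
    ∀ (cats : List (String × String × List String)) (d : String × String × Int),
      cats.foldl (fun b c => if b.2.2 < f c then (c.1, c.2.1, f c) else b) d =
      (match PySem.List.sorted (cats.map (fun c => (c.1, c.2.1, f c))) (fun x => x.2.2) true with
        | [] => d
        | h :: _ => if d.2.2 < h.2.2 then h else d) := by
  intro cats
  induction cats using List.reverseRecOn with
  | nil => intro d; simp [PySem.List.sorted]
  | append_singleton cats c ih =>
    intro d
    rw [List.map_append, PySem.List.sorted_rev_eq_foldl_insertBy]
    rw [List.foldl_append]
    rw [List.foldl_append]
    rw [← PySem.List.sorted_rev_eq_foldl_insertBy, ih d]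
    cases hs : PySem.List.sorted (cats.map (fun c => (c.1, c.2.1, f c))) (fun x => x.2.2) true with
    | nil => simp [PySem.List.insertBy]
    | cons h t =>
      simp only [List.map_cons, List.map_nil, List.foldl_cons, List.foldl_nil,
        pv_insertBy_cons]
      split_ifs <;> simp_all <;> omega

-- the foldl argmax can only raise the score of its seed
lemma pv_fold_mono (f : String × String × List String → Int) :
    ∀ (l : List (String × String × List String)) (d : String × String × Int),
      d.2.2 ≤ (l.foldl (fun b c => if b.2.2 < f c then (c.1, c.2.1, f c) else b) d).2.2 := by
  intro l
  induction l with
  | nil => intro d; simp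
  | cons x xs ih =>
    intro d
    simp only [List.foldl_cons]
    by_cases h : d.2.2 < f x
    · rw [if_pos h]
      exact le_of_lt (lt_of_lt_of_le h (ih (x.1, x.2.1, f x)))
    · rw [if_neg h]
      exact ih d

-- seed comparison: a higher-scoring seed either survives or yields the same result
lemma pv_fold_seed (f : String × String × List String → Int) :
    ∀ (l : List (String × String × List String)) (d e : String × String × Int),
      e.2.2 ≤ d.2.2 →
      l.foldl (fun b c => if b.2.2 < f c then (c.1, c.2.1, f c) else b) d =
        (if (l.foldl (fun b c => if b.2.2 < f c then (c.1, c.2.1, f c) else b) e).2.2 ≤ d.2.2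
          then d
          else l.foldl (fun b c => if b.2.2 < f c then (c.1, c.2.1, f c) else b) e) := by
  intro l
  induction l with
  | nil =>
    intro d e he
    simp only [List.foldl_nil]
    rw [if_pos he]
  | cons x xs ih =>
    intro d e he
    simp only [List.foldl_cons]
    by_cases hd : d.2.2 < f x
    · have hex : e.2.2 < f x := lt_of_le_of_lt he hd
      rw [if_pos hd, if_pos hex]
      have hm := pv_fold_mono f xs (x.1, x.2.1, f x)
      have hgt : d.2.2 < (xs.foldl (fun b c => if b.2.2 < f c then (c.1, c.2.1, f c) else b) (x.1, x.2.1, f x)).2.2 :=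
        lt_of_lt_of_le hd hm
      rw [if_neg (not_le.mpr hgt)]
    · by_cases hex : e.2.2 < f x
      · rw [if_neg hd, if_pos hex]
        exact ih d (x.1, x.2.1, f x) (not_lt.mp hd)
      · rw [if_neg hd, if_neg hex]
        exact ih d e he
  
-- B's recursion computes the left-to-right foldl argmax seeded with the first category
lemma pv_best_eq_foldl (tl text : List Char) :
    ∀ (rest : List (String × String × List String)) (c : String × String × List String),
      pvBest tl text (c :: rest) =
        rest.foldl
          (fun b c => if b.2.2 < pvScore c.2.2 tl text then (c.1, c.2.1, pvScore c.2.2 tl text) else b)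
          (c.1, c.2.1, pvScore c.2.2 tl text) := by
  intro rest
  induction rest with
  | nil => intro c; simp [pvBest]
  | cons x xs ih =>
    intro c
    rw [show pvBest tl text (c :: x :: xs) =
        (if (c.1, c.2.1, pvScore c.2.2 tl text).2.2 ≥ (pvBest tl text (x :: xs)).2.2
          then (c.1, c.2.1, pvScore c.2.2 tl text)
          else pvBest tl text (x :: xs)) from by simp [pvBest]]
    rw [ih x]
    simp only [List.foldl_cons]
    by_cases hc : (c.1, c.2.1, pvScore c.2.2 tl text).2.2 < pvScore x.2.2 tl text
    · rw [if_pos hc]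
      have hm := pv_fold_mono (fun c => pvScore c.2.2 tl text) xs (x.1, x.2.1, pvScore x.2.2 tl text)
      have hgt := lt_of_lt_of_le hc hm
      rw [if_neg (not_le.mpr hgt)]
    · rw [if_neg hc]
      rw [pv_fold_seed (fun c => pvScore c.2.2 tl text) xs
        (c.1, c.2.1, pvScore c.2.2 tl text) (x.1, x.2.1, pvScore x.2.2 tl text) (not_lt.mp hc)]

lemma pv_sorted_map_ne_nil (f : String × String × List String → Int) :
    PySem.List.sorted (pvPostTypes.map (fun c => (c.1, c.2.1, f c))) (fun x => x.2.2) true ≠ [] := by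
  rw [Ne, PySem.List.sorted_eq_nil_iff, List.map_eq_nil_iff]
  decide

-- ===== VERDICT (by name: the statement is the Claim_ definition above) =====
theorem detect_post_type_spec : Claim_equal_detect_post_type := by
  intro title body _
  show detect_post_type title body = detect_post_type_alt title body
  unfold detect_post_type detect_post_type_alt
  dsimp only
  set tl := PySem.Chars.lower title.toList with htl
  set text := PySem.Chars.lower (title.toList ++ ' ' :: body.toList) with htext
  rw [PySem.List.foldl_append_singleton_eq_map, List.nil_append]
  simp only [fun kws => pv_score_eq tl text kws 0, zero_add]
  -- B's side: recursion → foldl from first element → foldl from a sub-zero seed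
  obtain ⟨c0, rest, hp⟩ : ∃ c0 rest, pvPostTypes = c0 :: rest := ⟨_, _, rfl⟩
  rw [hp, pv_best_eq_foldl tl text rest c0]
  have hseed : (c0.1, c0.2.1, pvScore c0.2.2 tl text) =
      (if (("", "", (-1 : Int)) : String × String × Int).2.2 < pvScore c0.2.2 tl text
        then (c0.1, c0.2.1, pvScore c0.2.2 tl text) else ("", "", (-1 : Int))) := by
    rw [if_pos]; have := pv_score_nonneg c0.2.2 tl text; simp; omega
  rw [hseed, show
      (rest.foldl
        (fun b c => if b.2.2 < pvScore c.2.2 tl text then (c.1, c.2.1, pvScore c.2.2 tl text) else b)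
        (if (("", "", (-1 : Int)) : String × String × Int).2.2 < pvScore c0.2.2 tl text
          then (c0.1, c0.2.1, pvScore c0.2.2 tl text) else ("", "", (-1 : Int)))) =
      ((c0 :: rest).foldl
        (fun b c => if b.2.2 < pvScore c.2.2 tl text then (c.1, c.2.1, pvScore c.2.2 tl text) else b)
        ("", "", (-1 : Int))) from by simp only [List.foldl_cons]]
  rw [pv_fold_eq_sorted (fun c => pvScore c.2.2 tl text) (c0 :: rest) ("", "", (-1 : Int)), ← hp]
  cases hs : PySem.List.sorted
      (pvPostTypes.map (fun c => (c.1, c.2.1, pvScore c.2.2 tl text))) (fun x => x.2.2) true with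
  | nil => exact absurd hs (pv_sorted_map_ne_nil _)
  | cons h t =>
    have hmem : h ∈ pvPostTypes.map (fun c => (c.1, c.2.1, pvScore c.2.2 tl text)) := by
      rw [← PySem.List.mem_sorted (key := fun x => x.2.2) (rev := true), hs]; exact List.mem_cons_self
    obtain ⟨c, _, hc⟩ := List.mem_map.mp hmem
    have hh : (0 : Int) ≤ h.2.2 := by
      rw [← hc]; exact pv_score_nonneg c.2.2 tl text
    have hlt : (-1 : Int) < h.2.2 := by omega
    simp only [PySem.List.pyGetD_zero_cons]
    by_cases h0 : (0 : Int) < h.2.2 <;> simp [h0, hlt, gt_iff_lt]
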